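-- pv_equiv track=rewrite | github.com/ClausElmann/analysis-tool | core/gap_analyzer.py | _detect_modules_without_features
-- ===== SOURCE A (Python) =====
-- from typing import Any, Dict, List, Set
--
-- def _norm(text: str) -> str:
--     """Lowercase and strip for consistent comparison."""
--     return text.lower().strip()
--
-- def _detect_modules_without_features(
--     modules: List[Dict],
--     wi_feature_titles: Set[str],
-- ) -> List[Dict]:
--     """Gap type: module has no matching work item feature."""
--     gaps: List[Dict] = []
--     norm_titles = {_norm(t) for t in wi_feature_titles}
--     for mod in modules:
--         mod_name = mod.get("name", "") or ""
--         # Module is covered if any feature title contains the module name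
--         covered = any(_norm(mod_name) in t for t in norm_titles)
--         if not covered and mod_name:
--             gaps.append({
--                 "type": "missing_requirement",
--                 "description": f'Module "{mod_name}" has no matching work item feature',
--             })
--     return gaps
-- ===== SOURCE B (Python) =====
-- def _norm(text: str) -> str:
--     return text.lower().strip()
--
-- def _detect_modules_without_features(modules, wi_feature_titles):
--     # Index of ALL substrings of the normalized titles, built once;
--     # each module then costs one hash lookup instead of a scan over the titles.
--     subs = set()
--     for t in wi_feature_titles:
--         nt = _norm(t)
--         n = len(nt)
--         for i in range(n + 1):
--             for j in range(i, n + 1):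
--                 subs.add(nt[i:j])
--     gaps = []
--     for mod in modules:
--         name = mod.get("name", "") or ""
--         if name and _norm(name) not in subs:
--             gaps.append({
--                 "type": "missing_requirement",
--                 "description": f'Module "{name}" has no matching work item feature',
--             })
--     return gaps
-- ===== Notes on version B (the rewrite author's own statement) =====
-- stated objective: alternative
-- what changed: A scans every normalized title with a substring test inside the module loop; B instead builds a hash-set index of ALL substrings of the normalized titles once, so the per-module coverage test becomes a single set lookup and the inner scan over titles disappears.
import Mathlib
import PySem

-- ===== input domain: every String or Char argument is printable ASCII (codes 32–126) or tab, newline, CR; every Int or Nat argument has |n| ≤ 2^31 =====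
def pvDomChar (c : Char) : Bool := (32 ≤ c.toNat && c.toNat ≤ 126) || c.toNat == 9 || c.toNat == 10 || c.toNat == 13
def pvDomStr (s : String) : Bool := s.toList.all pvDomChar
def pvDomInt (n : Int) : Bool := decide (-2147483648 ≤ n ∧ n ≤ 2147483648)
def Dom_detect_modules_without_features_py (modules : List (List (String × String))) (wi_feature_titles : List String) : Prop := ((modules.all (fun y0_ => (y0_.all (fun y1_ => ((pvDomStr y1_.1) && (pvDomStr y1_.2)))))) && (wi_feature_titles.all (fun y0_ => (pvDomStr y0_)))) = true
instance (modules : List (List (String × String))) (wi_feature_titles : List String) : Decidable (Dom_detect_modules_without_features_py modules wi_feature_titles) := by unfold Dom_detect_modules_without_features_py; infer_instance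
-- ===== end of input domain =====

-- B replaces A's per-module scan over the title set by a substring index: it enumerates every
-- substring of every normalized title into one set, so each module costs a single set lookup;
-- the return value is proved equal on all inputs (A is total).

-- ===== PORT A =====
-- _norm(text): text.lower().strip()   (both sources define this same module-level helper)
def pvNorm (t : String) : String := PySem.Str.strip (PySem.Str.lower t)

-- the gap dict literal both sources build (the f-string is a concatenation)
def pvGap (name : String) : List (String × String) :=
  [("type", "missing_requirement"),
   ("description", "Module \"" ++ name ++ "\" has no matching work item feature")]

def detect_modules_without_features_py (modules : List (List (String × String))) (wi_feature_titles : List String) : List (List (String × String)) :=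
  let norm_titles : PySem.Set String := PySem.Set.ofList (wi_feature_titles.map (fun t => pvNorm t))
  modules.foldl (fun gaps mod =>
    let v := PySem.Dict.getD (PySem.Dict.mk mod) "name" ""
    let mod_name := if v == "" then "" else v        -- mod.get("name", "") or ""
    let covered := norm_titles.any (fun t => PySem.Str.isIn (pvNorm mod_name) t)
    if !covered && mod_name != "" then gaps ++ [pvGap mod_name] else gaps) []

-- ===== PORT B =====
def detect_modules_without_features_py_alt (modules : List (List (String × String))) (wi_feature_titles : List String) : List (List (String × String)) :=
  -- substring index of the normalized titles, built once
  let subs : PySem.Set String := wi_feature_titles.foldl (fun subs t =>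
      let nt := pvNorm t
      let n : Int := PySem.Str.len nt
      (PySem.List.pyRange 0 (n + 1) 1).foldl (fun subs i =>
        (PySem.List.pyRange i (n + 1) 1).foldl (fun subs j =>
          PySem.Set.add subs (PySem.Str.slice nt (some i) (some j))) subs) subs)
    PySem.Set.empty
  modules.foldl (fun gaps mod =>
    let v := PySem.Dict.getD (PySem.Dict.mk mod) "name" ""
    let name := if v == "" then "" else v            -- mod.get("name", "") or ""
    if name != "" && !(PySem.Set.contains subs (pvNorm name))
    then gaps ++ [pvGap name] else gaps) []

-- ===== PRECONDITION & SPEC =====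
def Spec_detect_modules_without_features_py (modules : List (List (String × String))) (wi_feature_titles : List String) (out : List (List (String × String))) : Prop := out = detect_modules_without_features_py_alt modules wi_feature_titles
instance (modules : List (List (String × String))) (wi_feature_titles : List String) (out : List (List (String × String))) : Decidable (Spec_detect_modules_without_features_py modules wi_feature_titles out) := by unfold Spec_detect_modules_without_features_py; infer_instance

-- ===== CLAIM (what is proved, stated in full; the proofs are below) =====
def Claim_equal_detect_modules_without_features_py : Prop := ∀ (modules : List (List (String × String))) (wi_feature_titles : List String), Dom_detect_modules_without_features_py modules wi_feature_titles → Spec_detect_modules_without_features_py modules wi_feature_titles (detect_modules_without_features_py modules wi_feature_titles)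

-- ===== LEMMAS AND PROOFS =====

-- the substring set one title contributes (B's two inner loops)
def pvAddSubs (subs : PySem.Set String) (nt : String) : PySem.Set String :=
  (PySem.List.pyRange 0 ((PySem.Str.len nt) + 1) 1).foldl (fun subs i =>
    (PySem.List.pyRange i ((PySem.Str.len nt) + 1) 1).foldl (fun subs j =>
      PySem.Set.add subs (PySem.Str.slice nt (some i) (some j))) subs) subs

-- membership through a fold whose step only adds elements satisfying P
theorem pv_mem_foldl {α : Type} (l : List α) (g : PySem.Set String → α → PySem.Set String)
    (P : α → String → Prop)
    (hg : ∀ s x k, k ∈ g s x ↔ k ∈ s ∨ P x k) (s : PySem.Set String) (k : String) :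
    k ∈ l.foldl g s ↔ k ∈ s ∨ ∃ x ∈ l, P x k := by
  induction l generalizing s with
  | nil => simp
  | cons x rest ih =>
    simp only [List.foldl_cons, ih, hg, List.mem_cons]
    constructor
    · rintro ((h | h) | ⟨y, hy, hp⟩)
      · exact Or.inl h
      · exact Or.inr ⟨x, Or.inl rfl, h⟩
      · exact Or.inr ⟨y, Or.inr hy, hp⟩
    · rintro (h | ⟨y, (rfl | hy), hp⟩)
      · exact Or.inl (Or.inl h)
      · exact Or.inl (Or.inr hp)
      · exact Or.inr ⟨y, hy, hp⟩

-- what pvAddSubs contributes: exactly the infixes of nt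
theorem pv_mem_addSubs (subs : PySem.Set String) (nt : String) (k : String) :
    k ∈ pvAddSubs subs nt ↔ k ∈ subs ∨ k.toList <:+: nt.toList := by
  unfold pvAddSubs
  rw [pv_mem_foldl _ _ (fun i k => ∃ j ∈ PySem.List.pyRange i ((PySem.Str.len nt) + 1) 1,
        k = PySem.Str.slice nt (some i) (some j))
      (fun s i k => pv_mem_foldl _ _ (fun j k => k = PySem.Str.slice nt (some i) (some j))
        (fun s j k => by rw [PySem.Set.mem_add]) s k)]
  constructor
  · rintro (h | ⟨i, hi, j, hj, rfl⟩)
    · exact Or.inl h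
    · refine Or.inr ?_
      rw [PySem.List.mem_pyRange_one] at hi hj
      obtain ⟨i, rfl⟩ : ∃ i' : Nat, (i' : Int) = i := ⟨i.toNat, Int.toNat_of_nonneg hi.1⟩
      obtain ⟨j, rfl⟩ : ∃ j' : Nat, (j' : Int) = j :=
        ⟨j.toNat, Int.toNat_of_nonneg (le_trans hi.1 hj.1)⟩
      rw [PySem.Str.toList_slice, PySem.Chars.slice_eq_listSlice, PySem.List.slice_natCast]
      exact (List.take_prefix _ _).isInfix.trans (List.drop_suffix i nt.toList).isInfix
  · rintro (h | ⟨pre, suf, h⟩)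
    · exact Or.inl h
    · refine Or.inr ⟨(pre.length : Int), ?_, (pre.length + k.toList.length : Int), ?_, ?_⟩
      · rw [PySem.List.mem_pyRange_one]
        have : pre.length + k.toList.length + suf.length = nt.toList.length := by
          rw [← h]; simp; omega
        constructor
        · exact_mod_cast Nat.zero_le _
        · simp only [PySem.Str.len_eq]; omega
      · rw [PySem.List.mem_pyRange_one]
        have : pre.length + k.toList.length + suf.length = nt.toList.length := by
          rw [← h]; simp; omega
        constructor
        · exact_mod_cast Nat.le_add_right _ _
        · simp only [PySem.Str.len_eq]; omega
      · apply String.toList_inj.mp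
        rw [PySem.Str.toList_slice]
        have hcast : ((pre.length : Int) + (k.toList.length : Int)) = ((pre.length + k.toList.length : Nat) : Int) := by push_cast; ring
        rw [hcast, PySem.Chars.slice_eq_listSlice, PySem.List.slice_natCast, ← h]
        simp

-- B's whole index: a key is present iff it is an infix of some normalized title
theorem pv_mem_subs (titles : List String) (k : String) :
    k ∈ titles.foldl (fun subs t => pvAddSubs subs (pvNorm t)) PySem.Set.empty ↔
      ∃ t ∈ titles, k.toList <:+: (pvNorm t).toList := by
  rw [pv_mem_foldl _ _ (fun t k => k.toList <:+: (pvNorm t).toList)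
      (fun s t k => pv_mem_addSubs s (pvNorm t) k)]
  simp [PySem.Set.empty]

-- any over the dedup set = any over the list
theorem pv_set_any (l : List String) (p : String → Bool) :
    (PySem.Set.ofList l).any p = l.any p := by
  rcases h : l.any p with _ | _
  · simp only [List.any_eq_false] at h ⊢
    intro x hx; exact h x ((PySem.Set.mem_ofList l x).1 hx)
  · simp only [List.any_eq_true] at h ⊢
    obtain ⟨x, hx, hp⟩ := h
    exact ⟨x, (PySem.Set.mem_ofList l x).2 hx, hp⟩

-- the coverage tests of A and B coincide on every key
theorem pv_covered (titles : List String) (k : String) :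
    PySem.Set.contains
      (titles.foldl (fun subs t => pvAddSubs subs (pvNorm t)) PySem.Set.empty) k
      = (PySem.Set.ofList (titles.map (fun t => pvNorm t))).any
          (fun t => PySem.Str.isIn k t) := by
  rw [pv_set_any, Bool.eq_iff_iff, PySem.Set.contains_iff, pv_mem_subs]
  simp only [List.any_eq_true, List.mem_map]
  constructor
  · rintro ⟨t, ht, hinf⟩
    exact ⟨pvNorm t, ⟨t, ht, rfl⟩, (PySem.Str.isIn_iff_infix k (pvNorm t)).mpr hinf⟩
  · rintro ⟨nt, ⟨t, ht, rfl⟩, hp⟩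
    exact ⟨t, ht, (PySem.Str.isIn_iff_infix k (pvNorm t)).mp hp⟩

-- ===== VERDICT (by name: the statement is the Claim_ definition above) =====
theorem detect_modules_without_features_py_spec : Claim_equal_detect_modules_without_features_py := by
  intro modules wi_feature_titles _
  unfold Spec_detect_modules_without_features_py
  unfold detect_modules_without_features_py detect_modules_without_features_py_alt
  have hsubs : wi_feature_titles.foldl (fun subs t =>
      let nt := pvNorm t
      let n : Int := PySem.Str.len nt
      (PySem.List.pyRange 0 (n + 1) 1).foldl (fun subs i =>
        (PySem.List.pyRange i (n + 1) 1).foldl (fun subs j =>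
          PySem.Set.add subs (PySem.Str.slice nt (some i) (some j))) subs) subs)
      PySem.Set.empty
      = wi_feature_titles.foldl (fun subs t => pvAddSubs subs (pvNorm t)) PySem.Set.empty := rfl
  simp only [hsubs]
  congr 1
  funext gaps mod
  simp only [pv_covered, Bool.and_comm]
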